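-- pv_equiv track=rewrite | github.com/alexeydemin/faang_tasks | codility/toptal/3.py | solution
-- ===== SOURCE A (Python) =====
-- def solution(A):
--     n = len(A)
--     if n == 1:
--         return A[0]
--     if not n:
--         return 0
--     A.sort()
--     sum = 0
--     for i in range(1, n):
--         sum += A[i] * (n - i)
--     return sum + (n - 1) * A[0]
-- ===== SOURCE B (Python) =====
-- def solution(A):
--     A.sort()
--     n = len(A)
--     if n == 1:
--         return A[0]
--     if not n:
--         return 0
--     total = 0
--     i = 0
--     while i < n:
--         j = i + 1
--         while j < n and A[j] == A[i]:
--             j += 1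
--         c = j - i
--         total += A[i] * (c * (2 * (n - i) - c + 1) // 2)
--         i = j
--     return total - A[0]
-- ===== Notes on version B (the rewrite author's own statement) =====
-- stated objective: alternative
-- what changed: B replaces A's per-element weighted loop A[i]*(n-i) with run-length grouping of the sorted list: each maximal run of c equal values contributes its value times the arithmetic-series weight c*(2*(n-i)-c+1)//2 computed in closed form, and the minimum is corrected by a single subtraction instead of a separate weight.
import Mathlib
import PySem

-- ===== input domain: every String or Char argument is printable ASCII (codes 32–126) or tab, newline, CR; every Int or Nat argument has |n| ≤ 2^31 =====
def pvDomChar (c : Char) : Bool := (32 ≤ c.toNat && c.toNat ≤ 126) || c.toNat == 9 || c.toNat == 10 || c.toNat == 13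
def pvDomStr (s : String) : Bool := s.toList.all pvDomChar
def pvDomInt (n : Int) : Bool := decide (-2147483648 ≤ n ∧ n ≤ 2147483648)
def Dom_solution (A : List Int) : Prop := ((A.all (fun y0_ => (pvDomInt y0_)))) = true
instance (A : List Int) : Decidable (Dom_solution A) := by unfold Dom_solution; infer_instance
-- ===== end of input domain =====

-- B groups the sorted list into maximal runs of equal values and charges each run a
-- closed-form arithmetic-series weight, instead of A's per-element multiply A[i]*(n-i);
-- same O(n log n) cost. Both Pythons sort the argument in place (A skips the no-op sort
-- when len(A) == 1); the equivalence proved here is about the RETURN value.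

-- ===== PORT A =====
def solution (A : List Int) : Int :=
  let n : Int := A.length
  if n = 1 then PySem.List.pyGetD A 0 0        -- A[0]: in range since n = 1
  else if n = 0 then 0
  else
    let s := PySem.List.sorted A (fun x => x) false
    let sum := (PySem.List.pyRange 1 n 1).foldl
      (fun acc i => acc + PySem.List.pyGetD s i 0 * (n - i)) 0   -- s[i]: 1 ≤ i < n, in range
    sum + (n - 1) * PySem.List.pyGetD s 0 0    -- A[0] after the sort: in range since n ≥ 2

-- ===== PORT B =====
/-- Source B's inner `while j < n and A[j] == A[i]: j += 1` — scan past the run of `v`. -/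
def pvBInner (s : List Int) (v : Int) (j : Nat) : Nat :=
  if h : j < s.length then
    if s[j] = v then pvBInner s v (j + 1) else j
  else j
termination_by s.length - j

/-- the inner while never moves `j` backwards (termination fact for the outer loop). -/
lemma pvBInner_ge (s : List Int) (v : Int) (j : Nat) : j ≤ pvBInner s v j := by
  fun_induction pvBInner s v j with
  | case1 j h heq ih => omega
  | case2 j h heq => omega
  | case3 j h => omega

/-- Source B's outer `while i < n` loop: one maximal run per iteration, closed-form weight. -/
def pvBOuter (s : List Int) (i : Nat) (total : Int) : Int :=
  if h : i < s.length then
    let j := pvBInner s (s[i]) (i + 1)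
    let c : Int := (j : Int) - (i : Int)
    pvBOuter s j (total + s[i] * PySem.Int.floordiv (c * (2 * ((s.length : Int) - i) - c + 1)) 2)
  else total
termination_by s.length - i
decreasing_by
  have := pvBInner_ge s (s[i]) (i + 1)
  omega

def solution_alt (A : List Int) : Int :=
  let s := PySem.List.sorted A (fun x => x) false
  let n : Int := s.length
  if n = 1 then PySem.List.pyGetD s 0 0        -- A[0]: in range since n = 1
  else if n = 0 then 0
  else pvBOuter s 0 0 - PySem.List.pyGetD s 0 0   -- s[0]: in range since n ≥ 2

-- ===== PRECONDITION & SPEC =====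
def Spec_solution (A : List Int) (out : Int) : Prop := out = solution_alt A
instance (A : List Int) (out : Int) : Decidable (Spec_solution A out) := by unfold Spec_solution; infer_instance

-- ===== CLAIM (what is proved, stated in full; the proofs are below) =====
def Claim_equal_solution : Prop := ∀ (A : List Int), Dom_solution A → Spec_solution A (solution A)

-- ===== LEMMAS AND PROOFS =====

/-- The common value: `pvG u = Σ_{j < |u|} u[j] * (|u| - j)`. -/
def pvG : List Int → Int
  | [] => 0
  | x :: xs => x * ((x :: xs).length : Int) + pvG xs

/-- A's loop: summing `s[i] * (n - i)` over `range(a, n)` equals `pvG` of the dropped suffix. -/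
lemma pvA_fold (u : List Int) : ∀ (s : List Int) (a acc : Int), 0 ≤ a →
    s.drop a.toNat = u →
    (PySem.List.pyRange a (s.length : Int) 1).foldl
      (fun acc i => acc + PySem.List.pyGetD s i 0 * ((s.length : Int) - i)) acc
      = acc + pvG u := by
  induction u with
  | nil =>
    intro s a acc ha hdrop
    have hlen : s.length ≤ a.toNat := by
      by_contra h
      have := List.drop_eq_nil_iff.mp hdrop
      omega
    rw [PySem.List.pyRange_one_eq_nil (by omega)]
    simp [pvG]
  | cons x xs ih =>
    intro s a acc ha hdrop
    have hlt : a.toNat < s.length := by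
      by_contra h
      rw [List.drop_eq_nil_of_le (by omega)] at hdrop
      simp at hdrop
    have haInt : a < (s.length : Int) := by omega
    rw [PySem.List.pyRange_one_cons haInt, List.foldl_cons]
    have hget? : s[a.toNat]? = some x := by
      have h := congrArg (fun l => l[0]?) hdrop
      simpa [List.getElem?_drop] using h
    have hget : s[a.toNat]'hlt = x := by
      have h2 : s[a.toNat]? = some (s[a.toNat]'hlt) := List.getElem?_eq_getElem hlt
      rw [h2] at hget?
      exact Option.some.inj hget?
    have hgetD : PySem.List.pyGetD s a 0 = x := by
      rw [PySem.List.pyGetD_eq_getElem s 0 ha haInt, hget]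
    have hdrop' : s.drop (a + 1).toNat = xs := by
      have h3 : (a + 1).toNat = a.toNat + 1 := by omega
      rw [h3, ← List.drop_drop, hdrop]
      rfl
    rw [ih s (a + 1) _ (by omega) hdrop']
    have hlenu : ((x :: xs).length : Int) = (s.length : Int) - a := by
      have h4 := congrArg List.length hdrop
      simp at h4
      simp only [List.length_cons]
      push_cast
      omega
    rw [hgetD, ← hlenu]
    simp [pvG]
    ring

/-- Weight sum `Σ_{t < c} (m - t)` of a run of length `c` starting at weight `m`. -/
def pvW : Nat → Int → Int
  | 0, _ => 0
  | c + 1, m => m + pvW c (m - 1)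

/-- doubling identity for the run-weight sum. -/
lemma pvW_double (c : Nat) : ∀ (m : Int), (c : Int) * (2 * m - c + 1) = 2 * pvW c m := by
  induction c with
  | zero => intro m; simp [pvW]
  | succ c ih =>
    intro m
    have := ih (m - 1)
    simp only [pvW]
    push_cast
    push_cast at this
    nlinarith [this]

/-- Source B's closed form for the weight of a run: `c*(2m - c + 1) // 2 = pvW c m`. -/
lemma pvW_closed (c : Nat) (m : Int) :
    PySem.Int.floordiv ((c : Int) * (2 * m - c + 1)) 2 = pvW c m := by
  rw [pvW_double c m, PySem.Int.floordiv_eq_ediv_of_pos (by norm_num),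
    Int.mul_ediv_cancel_left _ (by norm_num)]

/-- Peeling a run of `c` equal values off `pvG (s.drop i)`. -/
lemma pvG_run (s : List Int) (v : Int) : ∀ (c i : Nat), i + c ≤ s.length →
    (∀ k (hk : k < s.length), i ≤ k → k < i + c → s[k] = v) →
    pvG (s.drop i) = v * pvW c ((s.length : Int) - i) + pvG (s.drop (i + c)) := by
  intro c
  induction c with
  | zero => intro i _ _; simp [pvW]
  | succ c ih =>
    intro i hle hrun
    have hi : i < s.length := by omega
    have hdrop : s.drop i = s[i] :: s.drop (i + 1) := by
      rw [List.drop_eq_getElem_cons hi]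
    have hv : s[i] = v := hrun i hi (le_refl i) (by omega)
    have hrec := ih (i + 1) (by omega) (fun k hk h1 h2 => hrun k hk (by omega) (by omega))
    rw [hdrop, hv]
    simp only [pvG, List.length_cons, List.length_drop]
    rw [hrec]
    have hlen : ((s.length - (i + 1) + 1 : Nat) : Int) = (s.length : Int) - i := by omega
    have hstep : i + 1 + c = i + (c + 1) := by omega
    rw [hlen, hstep]
    simp only [pvW]
    push_cast
    ring_nf

/-- The inner scan stays within bounds. -/
lemma pvBInner_le (s : List Int) (v : Int) : ∀ (j : Nat), j ≤ s.length → pvBInner s v j ≤ s.length := by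
  intro j
  fun_induction pvBInner s v j with
  | case1 j h heq ih => intro _; exact ih (by omega)
  | case2 j h heq => intro hj; exact hj
  | case3 j h => intro hj; exact hj

/-- Every position the inner scan passes holds the run value `v`. -/
lemma pvBInner_run (s : List Int) (v : Int) : ∀ (j : Nat), ∀ k (hk : k < s.length),
    j ≤ k → k < pvBInner s v j → s[k] = v := by
  intro j
  fun_induction pvBInner s v j with
  | case1 j h heq ih =>
    intro k hk h1 h2
    by_cases hkj : k = j
    · subst hkj; exact heq
    · exact ih k hk (by omega) h2
  | case2 j h heq => intro k hk h1 h2; omega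
  | case3 j h => intro k hk h1 h2; omega

/-- Source B's outer loop computes `total + pvG (s.drop i)`. -/
lemma pvBOuter_eq (s : List Int) (i : Nat) (total : Int) :
    pvBOuter s i total = total + pvG (s.drop i) := by
  fun_induction pvBOuter s i total with
  | case1 i total h j c ih =>
    rw [ih]
    have hge : i + 1 ≤ j := pvBInner_ge s (s[i]) (i + 1)
    have hle : j ≤ s.length := pvBInner_le s (s[i]) (i + 1) (by omega)
    have hrun : ∀ k (hk : k < s.length), i ≤ k → k < i + (j - i) → s[k] = s[i] := by
      intro k hk h1 h2
      by_cases hki : k = i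
      · subst hki; rfl
      · exact pvBInner_run s (s[i]) (i + 1) k hk (by omega) (by omega)
    have hsplit := pvG_run s (s[i]) (j - i) i (by omega) hrun
    have hij : i + (j - i) = j := by omega
    rw [hij] at hsplit
    have hc : c = ((j - i : Nat) : Int) := by simp only [c]; omega
    rw [hsplit, hc, pvW_closed (j - i) ((s.length : Int) - i)]
    ring
  | case2 i total h =>
    rw [List.drop_eq_nil_of_le (by omega)]
    simp [pvG]

/-- a sorted singleton is itself. -/
lemma pv_sorted_singleton (x : Int) :
    PySem.List.sorted [x] (fun y => y) false = [x] := by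
  exact PySem.List.sorted_eq_self_of_pairwise [x] (fun y => y) (List.pairwise_singleton _ _)

-- ===== VERDICT (by name: the statement is the Claim_ definition above) =====
theorem solution_spec : Claim_equal_solution := by
  intro A _
  simp only [Spec_solution, solution, solution_alt, PySem.List.length_sorted]
  by_cases h1 : (A.length : Int) = 1
  · rw [if_pos h1, if_pos h1]
    obtain ⟨x, rfl⟩ : ∃ x, A = [x] := by
      match A, h1 with
      | [x], _ => exact ⟨x, rfl⟩
    rw [pv_sorted_singleton]
  · by_cases h0 : (A.length : Int) = 0
    · rw [if_neg h1, if_neg h1, if_pos h0, if_pos h0]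
    · rw [if_neg h1, if_neg h1, if_neg h0, if_neg h0]
      set s := PySem.List.sorted A (fun x => x) false with hs
      have hslen : s.length = A.length := PySem.List.length_sorted A (fun x => x) false
      clear_value s
      have hne : s ≠ [] := by
        intro hnil
        rw [hnil] at hslen
        simp at hslen
        omega
      have hA := pvA_fold (s.drop 1) s 1 0 (by norm_num) rfl
      rw [hslen] at hA
      rw [hA, pvBOuter_eq s 0 0]
      -- pvG s = s[0] * |s| + pvG (s.drop 1), so both sides are pvG s - s[0] rearranged
      obtain ⟨x, xs, rfl⟩ : ∃ x xs, s = x :: xs := by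
        match s, hne with
        | x :: xs, _ => exact ⟨x, xs, rfl⟩
      have hx0 : PySem.List.pyGetD (x :: xs) 0 0 = x := by
        simp [PySem.List.pyGetD, PySem.List.pyGet?, PySem.List.pyIdx?]
      rw [hx0]
      have hlen2 : ((x :: xs).length : Int) = (A.length : Int) := by exact_mod_cast hslen
      simp only [List.drop_succ_cons, List.drop_zero, pvG]
      rw [hlen2]
      ring
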